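-- pv_equiv track=rewrite | github.com/dddd2024/reverse-agent | reverse_agent/sample_solver.py | _index_to_candidate
-- ===== SOURCE A (Python) =====
-- def _index_to_candidate(charset: str, length: int, index: int) -> str:
--     base = len(charset)
--     chars = [charset[0]] * length
--     cur = index
--     for pos in range(length - 1, -1, -1):
--         chars[pos] = charset[cur % base]
--         cur //= base
--     return "".join(chars)
-- ===== SOURCE B (Python) =====
-- def _render(charset: str, width: int, value: int) -> str:
--     """Render value (0 <= value < len(charset)**width) as width base-N digits,
--     splitting the number in half instead of peeling one digit at a time."""
--     if value == 0:
--         return charset[0] * width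
--     if width == 1:
--         return charset[value]
--     lo = width // 2
--     q, r = divmod(value, len(charset) ** lo)
--     return _render(charset, width - lo, q) + _render(charset, lo, r)
--
--
-- def _index_to_candidate(charset: str, length: int, index: int) -> str:
--     base = len(charset)
--     width = max(length, 0)
--     return _render(charset, width, index % base ** width)
-- ===== Notes on version B (the rewrite author's own statement) =====
-- stated objective: alternative
-- what changed: B reduces the index once modulo base**length to a canonical nonnegative residue and renders it by divide-and-conquer (splitting the value with one divmod at base**(width//2) and recursing on both halves, emitting zero-blocks wholesale), instead of A's length sequential divmod steps carrying a running quotient through a preallocated buffer; Pre_ excludes only the empty charset, on which A raises (IndexError or ZeroDivisionError).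
import Mathlib
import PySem

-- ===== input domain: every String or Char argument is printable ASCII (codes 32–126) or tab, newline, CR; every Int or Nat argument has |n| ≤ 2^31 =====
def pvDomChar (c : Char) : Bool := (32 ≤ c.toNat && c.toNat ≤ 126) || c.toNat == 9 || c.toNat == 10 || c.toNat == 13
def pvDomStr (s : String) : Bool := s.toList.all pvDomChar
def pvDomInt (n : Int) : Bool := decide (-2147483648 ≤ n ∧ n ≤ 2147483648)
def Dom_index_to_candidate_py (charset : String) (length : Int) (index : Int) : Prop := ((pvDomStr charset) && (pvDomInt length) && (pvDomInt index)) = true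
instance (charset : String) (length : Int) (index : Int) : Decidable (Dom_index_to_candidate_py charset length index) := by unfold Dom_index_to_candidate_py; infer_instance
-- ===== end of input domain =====

-- B reduces the index once modulo base**length and renders the nonnegative residue by
-- divide-and-conquer (split the number at base**(width//2)); A peels one digit per
-- position with a running quotient over a preallocated buffer.

-- ===== PORT A =====
-- charset[cur % base]: on Pre_ (charset ≠ "") the base is positive, so 0 ≤ cur % base < base and
-- getD with .toNat is exact Python indexing there (outside Pre_ Python raises and nothing is claimed).
def index_to_candidate_py (charset : String) (length : Int) (index : Int) : String :=
  let cs := charset.toList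
  let base : Int := (cs.length : Int)
  let st := (PySem.List.pyRange (length - 1) (-1) (-1)).foldl
    (fun (st : List Char × Int) pos =>
      (st.1.set pos.toNat (cs.getD (PySem.Int.mod st.2 base).toNat ' '),
       PySem.Int.floordiv st.2 base))
    (List.replicate length.toNat (cs.getD 0 ' '), index)
  String.mk st.1

-- ===== PORT B =====
-- _render of Source B: value == 0 → charset[0] * width; width == 1 → charset[value] (in range on the
-- invariant 0 ≤ value < base^width maintained from the entry point, so getD v.toNat is exact);
-- otherwise split at base ** (width // 2) with divmod and recurse on both halves.
-- The w = 0, v ≠ 0 arm is unreachable from the entry point (value < base^0 forces value = 0);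
-- it only makes the recursion total.
def pvRender (cs : List Char) (w : Nat) (v : Int) : List Char :=
  if v = 0 then List.replicate w (cs.getD 0 ' ')
  else match w with
  | 0 => []
  | 1 => [cs.getD v.toNat ' ']
  | (n+2) =>
    let lo : Nat := (n+2)/2
    let q := PySem.Int.floordiv v ((cs.length : Int) ^ lo)
    let r := PySem.Int.mod v ((cs.length : Int) ^ lo)
    pvRender cs ((n+2) - lo) q ++ pvRender cs lo r
termination_by w
decreasing_by all_goals omega

def index_to_candidate_py_alt (charset : String) (length : Int) (index : Int) : String :=
  let cs := charset.toList
  let base : Int := (cs.length : Int)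
  let width : Nat := (max length 0).toNat
  String.mk (pvRender cs width (PySem.Int.mod index (base ^ width)))

-- ===== PRECONDITION & SPEC =====
-- Pre_ excludes exactly the inputs where Python A raises: empty charset
-- (IndexError at charset[0], or ZeroDivisionError at cur % 0 when the loop runs).
def Pre_index_to_candidate_py (charset : String) (length : Int) (index : Int) : Prop := charset ≠ ""
instance (charset : String) (length : Int) (index : Int) : Decidable (Pre_index_to_candidate_py charset length index) := by unfold Pre_index_to_candidate_py; infer_instance
def pvWitness_index_to_candidate_py : String × Int × Int := ("ab", 3, 5)

def Spec_index_to_candidate_py (charset : String) (length : Int) (index : Int) (out : String) : Prop := out = index_to_candidate_py_alt charset length index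
instance (charset : String) (length : Int) (index : Int) (out : String) : Decidable (Spec_index_to_candidate_py charset length index out) := by unfold Spec_index_to_candidate_py; infer_instance

-- ===== CLAIM (what is proved, stated in full; the proofs are below) =====
def Claim_equal_index_to_candidate_py : Prop := ∀ (charset : String) (length : Int) (index : Int), Dom_index_to_candidate_py charset length index → Pre_index_to_candidate_py charset length index → Spec_index_to_candidate_py charset length index (index_to_candidate_py charset length index)

-- ===== LEMMAS AND PROOFS =====

-- Python mod by a positive divisor is Lean's emod
theorem pv_mod_eq_emod (a b : Int) (hb : 0 < b) : PySem.Int.mod a b = a % b := by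
  have h := PySem.Int.floordiv_mul_add_mod a b
  rw [PySem.Int.floordiv_eq_ediv_of_pos hb] at h
  have h2 := Int.ediv_add_emod a b
  linarith

-- unfolding equations of pvRender (it is defined by well-founded recursion)
theorem pvRender_v0 (cs : List Char) (w : Nat) : pvRender cs w 0 = List.replicate w (cs.getD 0 ' ') := by
  rw [pvRender.eq_def]; simp

theorem pvRender_one (cs : List Char) (v : Int) (hv : v ≠ 0) : pvRender cs 1 v = [cs.getD v.toNat ' '] := by
  rw [pvRender.eq_def]; simp [hv]

theorem pvRender_two (cs : List Char) (n : Nat) (v : Int) (hv : v ≠ 0) :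
    pvRender cs (n+2) v =
      pvRender cs ((n+2) - (n+2)/2) (PySem.Int.floordiv v ((cs.length : Int) ^ ((n+2)/2)))
      ++ pvRender cs ((n+2)/2) (PySem.Int.mod v ((cs.length : Int) ^ ((n+2)/2))) := by
  rw [pvRender.eq_def]; simp [hv]

-- the closed-form digit for shift k (A's loop invariant, and the digits B's renderer emits)
def pvDigit (cs : List Char) (c : Int) (k : Nat) : Char :=
  cs.getD (PySem.Int.mod (PySem.Int.floordiv c ((cs.length : Int) ^ k)) (cs.length : Int)).toNat ' '

theorem pvDigit_zero (cs : List Char) (c : Int) :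
    pvDigit cs c 0 = cs.getD (PySem.Int.mod c (cs.length : Int)).toNat ' ' := by
  unfold pvDigit
  rw [pow_zero, PySem.Int.floordiv_eq_ediv_of_pos one_pos, Int.ediv_one]

theorem pvDigit_floordiv (cs : List Char) (hcs : cs ≠ []) (c : Int) (k : Nat) :
    pvDigit cs (PySem.Int.floordiv c (cs.length : Int)) k = pvDigit cs c (k + 1) := by
  have hb : (0 : Int) < (cs.length : Int) := by
    have := List.length_pos_iff.mpr hcs; exact_mod_cast this
  have hbk : (0 : Int) < (cs.length : Int) ^ k := pow_pos hb k
  unfold pvDigit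
  rw [PySem.Int.floordiv_eq_ediv_of_pos hb, PySem.Int.floordiv_eq_ediv_of_pos hbk,
      PySem.Int.floordiv_eq_ediv_of_pos (pow_pos hb (k + 1)),
      Int.ediv_ediv_of_nonneg (le_of_lt hb), ← pow_succ']

-- digit 0 of anything at v = 0, at any shift, is the zero digit
theorem pvDigit_of_zero (cs : List Char) (hcs : cs ≠ []) (k : Nat) :
    pvDigit cs 0 k = cs.getD 0 ' ' := by
  have hb : (0 : Int) < (cs.length : Int) := by
    have := List.length_pos_iff.mpr hcs; exact_mod_cast this
  unfold pvDigit
  rw [PySem.Int.floordiv_eq_ediv_of_pos (pow_pos hb k), Int.zero_ediv,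
      pv_mod_eq_emod _ _ hb, Int.zero_emod]
  simp

-- dividing by base^lo shifts the digit index by lo
theorem pvDigit_floordiv_pow (cs : List Char) (hcs : cs ≠ []) (c : Int) (lo k : Nat) :
    pvDigit cs (PySem.Int.floordiv c ((cs.length : Int) ^ lo)) k = pvDigit cs c (lo + k) := by
  have hb : (0 : Int) < (cs.length : Int) := by
    have := List.length_pos_iff.mpr hcs; exact_mod_cast this
  unfold pvDigit
  rw [PySem.Int.floordiv_eq_ediv_of_pos (pow_pos hb lo),
      PySem.Int.floordiv_eq_ediv_of_pos (pow_pos hb k),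
      PySem.Int.floordiv_eq_ediv_of_pos (pow_pos hb (lo + k)),
      Int.ediv_ediv_of_nonneg (le_of_lt (pow_pos hb lo)), ← pow_add]

-- taking the remainder modulo base^lo does not change digits below shift lo
theorem pvDigit_emod_pow (cs : List Char) (hcs : cs ≠ []) (c : Int) (lo k : Nat) (hk : k < lo) :
    pvDigit cs (c % (cs.length : Int) ^ lo) k = pvDigit cs c k := by
  have hb : (0 : Int) < (cs.length : Int) := by
    have := List.length_pos_iff.mpr hcs; exact_mod_cast this
  have hbk : (0 : Int) < (cs.length : Int) ^ k := pow_pos hb k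
  unfold pvDigit
  rw [PySem.Int.floordiv_eq_ediv_of_pos hbk, PySem.Int.floordiv_eq_ediv_of_pos hbk,
      pv_mod_eq_emod _ _ hb, pv_mod_eq_emod _ _ hb]
  congr 1
  have hsplit : c = c % (cs.length : Int) ^ lo
      + (cs.length : Int) ^ k * ((cs.length : Int) ^ (lo - k) * (c / (cs.length : Int) ^ lo)) := by
    have h1 := Int.ediv_add_emod c ((cs.length : Int) ^ lo)
    have h2 : (cs.length : Int) ^ k * (cs.length : Int) ^ (lo - k) = (cs.length : Int) ^ lo := by
      rw [← pow_add]; congr 1; omega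
    rw [← mul_assoc, h2]; linarith
  conv_rhs => rw [hsplit]
  rw [Int.add_mul_ediv_left _ _ (ne_of_gt hbk)]
  have hfac : (cs.length : Int) ^ (lo - k) * (c / (cs.length : Int) ^ lo)
      = (cs.length : Int) * ((cs.length : Int) ^ (lo - k - 1) * (c / (cs.length : Int) ^ lo)) := by
    rw [← mul_assoc, ← pow_succ']; congr 2; omega
  rw [hfac, Int.add_mul_emod_self_left]

-- B's renderer produces exactly the closed-form digits, highest shift first
theorem pvRender_digits (cs : List Char) (hcs : cs ≠ []) :
    ∀ (w : Nat) (v : Int), 0 ≤ v → v < (cs.length : Int) ^ w →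
    pvRender cs w v = (List.range w).map (fun i => pvDigit cs v (w - 1 - i)) := by
  have hb : (0 : Int) < (cs.length : Int) := by
    have := List.length_pos_iff.mpr hcs; exact_mod_cast this
  intro w
  induction w using Nat.strong_induction_on with
  | _ w ih =>
    intro v hv0 hvlt
    by_cases hv : v = 0
    · subst hv
      rw [pvRender_v0]
      symm
      apply List.eq_replicate_iff.mpr
      refine ⟨by simp, ?_⟩
      intro x hx
      obtain ⟨i, _, rfl⟩ := List.mem_map.mp hx
      exact pvDigit_of_zero cs hcs _
    · match w, hvlt, ih with
      | 0, hvlt, ih => exfalso; rw [pow_zero] at hvlt; omega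
      | 1, hvlt, ih =>
        rw [pow_one] at hvlt
        rw [pvRender_one cs v hv]
        simp only [List.range_one, List.map_cons, List.map_nil, Nat.sub_self, pvDigit_zero]
        rw [pv_mod_eq_emod _ _ hb, Int.emod_eq_of_lt hv0 hvlt]
      | (n+2), hvlt, ih =>
        rw [pvRender_two cs n v hv]
        set lo : Nat := (n+2)/2 with hlo
        have hlo1 : 1 ≤ lo := by omega
        have hlolt : lo < n + 2 := by omega
        have hhilt : (n+2) - lo < n + 2 := by omega
        have hblo : (0 : Int) < (cs.length : Int) ^ lo := pow_pos hb lo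
        set q := PySem.Int.floordiv v ((cs.length : Int) ^ lo) with hq
        set r := PySem.Int.mod v ((cs.length : Int) ^ lo) with hr
        have hqe : q = v / (cs.length : Int) ^ lo := by
          rw [hq, PySem.Int.floordiv_eq_ediv_of_pos hblo]
        have hre : r = v % (cs.length : Int) ^ lo := by
          rw [hr, pv_mod_eq_emod _ _ hblo]
        have hq0 : 0 ≤ q := by rw [hqe]; exact Int.ediv_nonneg hv0 (le_of_lt hblo)
        have hqlt : q < (cs.length : Int) ^ ((n+2) - lo) := by
          rw [hqe]
          apply Int.ediv_lt_of_lt_mul hblo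
          calc v < (cs.length : Int) ^ (n+2) := hvlt
            _ = (cs.length : Int) ^ ((n+2) - lo) * (cs.length : Int) ^ lo := by
                rw [← pow_add]; congr 1; omega
        have hr0 : 0 ≤ r := by rw [hre]; exact Int.emod_nonneg v (ne_of_gt hblo)
        have hrlt : r < (cs.length : Int) ^ lo := by rw [hre]; exact Int.emod_lt_of_pos v hblo
        rw [ih _ hhilt q hq0 hqlt, ih _ hlolt r hr0 hrlt]
        have hsplit : n + 2 = ((n+2) - lo) + lo := by omega
        conv_rhs => rw [hsplit, List.range_add, List.map_append, List.map_map]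
        congr 1
        · apply List.map_congr_left
          intro i hi
          have hi' : i < (n+2) - lo := List.mem_range.mp hi
          rw [hq, pvDigit_floordiv_pow cs hcs v lo ((n+2) - lo - 1 - i)]
          congr 1
          omega
        · apply List.map_congr_left
          intro i hi
          have hi' : i < lo := List.mem_range.mp hi
          simp only [Function.comp]
          rw [hr, pv_mod_eq_emod _ _ hblo, pvDigit_emod_pow cs hcs v lo (lo - 1 - i) (by omega)]
          congr 1
          omega

-- set-then-drop at the written index
theorem pv_set_drop (l : List Char) (i : Nat) (a : Char) (h : i < l.length) :
    (l.set i a).drop i = a :: l.drop (i + 1) := by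
  rw [List.drop_eq_getElem_cons (by simpa using h)]
  simp [List.getElem_set_self, List.drop_set]

-- A's countdown loop computes the closed-form digits on positions 0..m and leaves the rest of the buffer
theorem pv_loop (cs : List Char) (hcs : cs ≠ []) :
    ∀ (m : Nat) (chars : List Char) (c : Int), m < chars.length →
    ((PySem.List.pyRange (m : Int) (-1) (-1)).foldl
      (fun (st : List Char × Int) pos =>
        (st.1.set pos.toNat (cs.getD (PySem.Int.mod st.2 (cs.length : Int)).toNat ' '),
         PySem.Int.floordiv st.2 (cs.length : Int)))
      (chars, c)).1
    = (List.range (m + 1)).map (fun i => pvDigit cs c (m - i)) ++ chars.drop (m + 1) := by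
  intro m
  induction m with
  | zero =>
    intro chars c h
    rw [PySem.List.pyRange_neg_one_cons (by simp), PySem.List.pyRange_neg_one_eq_nil (by simp)]
    simp only [List.foldl_cons, List.foldl_nil, Int.toNat_natCast]
    have := pv_set_drop chars 0 (cs.getD (PySem.Int.mod c (cs.length : Int)).toNat ' ') h
    simp only [List.drop_zero] at this
    simpa only [zero_add, List.range_one, List.map_cons, List.map_nil, Nat.sub_self,
      pvDigit_zero, List.cons_append, List.nil_append] using this
  | succ m ih =>
    intro chars c h
    have hcast : ((m + 1 : Nat) : Int) - 1 = (m : Int) := by push_cast; ring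
    rw [PySem.List.pyRange_neg_one_cons (by omega), hcast]
    simp only [List.foldl_cons, Int.toNat_natCast]
    rw [ih _ _ (by simpa using Nat.lt_of_succ_lt h)]
    have hset : ((chars.set (m + 1) (cs.getD (PySem.Int.mod c (cs.length : Int)).toNat ' ')).drop (m + 1))
        = cs.getD (PySem.Int.mod c (cs.length : Int)).toNat ' ' :: chars.drop (m + 1 + 1) := by
      rw [pv_set_drop _ _ _ (by simpa using h)]
    have hmap : (List.range (m + 1)).map
          (fun i => pvDigit cs (PySem.Int.floordiv c (cs.length : Int)) (m - i))
        = (List.range (m + 1)).map (fun i => pvDigit cs c (m + 1 - i)) := by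
      apply List.map_congr_left
      intro i hi
      have hi' : i ≤ m := Nat.lt_succ_iff.mp (List.mem_range.mp hi)
      rw [pvDigit_floordiv cs hcs c (m - i)]
      congr 1
      omega
    rw [hmap, hset]
    conv_rhs => rw [List.range_succ]
    rw [List.map_append, List.append_assoc]
    simp only [List.map_cons, List.map_nil, Nat.sub_self, pvDigit_zero,
      List.cons_append, List.nil_append]

-- ===== VERDICT (by name: the statement is the Claim_ definition above) =====
theorem index_to_candidate_py_spec : Claim_equal_index_to_candidate_py := by
  intro charset length index _ hpre
  have hpre' : charset ≠ "" := hpre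
  unfold Spec_index_to_candidate_py index_to_candidate_py index_to_candidate_py_alt
  simp only []
  set cs := charset.toList with hcs_def
  have hcs : cs ≠ [] := by simpa [hcs_def] using hpre'
  have hb : (0 : Int) < (cs.length : Int) := by
    have := List.length_pos_iff.mpr hcs; exact_mod_cast this
  by_cases hlen : length ≤ 0
  · rw [PySem.List.pyRange_neg_one_eq_nil (by omega)]
    have hw : (max length 0).toNat = 0 := by omega
    rw [hw]
    have : PySem.Int.mod index ((cs.length : Int) ^ 0) = 0 := by
      rw [pow_zero, pv_mod_eq_emod _ _ one_pos, Int.emod_one]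
    rw [this, pvRender_v0]
    simp [Int.toNat_of_nonpos hlen]
  · push_neg at hlen
    obtain ⟨n, hn⟩ : ∃ n : Nat, length = (n : Int) := ⟨length.toNat, (Int.toNat_of_nonneg hlen.le).symm⟩
    subst hn
    have hn0 : 0 < n := by exact_mod_cast hlen
    obtain ⟨m, rfl⟩ : ∃ m, n = m + 1 := ⟨n - 1, by omega⟩
    have hc : ((m + 1 : Nat) : Int) - 1 = (m : Int) := by push_cast; ring
    have hw : (max ((m + 1 : Nat) : Int) 0).toNat = m + 1 := by omega
    rw [hc, hw, pv_loop cs hcs m _ index (by simp)]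
    rw [show List.drop (m + 1) (List.replicate (((m + 1 : Nat) : Int)).toNat (cs.getD 0 ' ')) = ([] : List Char)
        from List.drop_eq_nil_of_le (by simp), List.append_nil]
    have hblo : (0 : Int) < (cs.length : Int) ^ (m + 1) := pow_pos hb (m + 1)
    have hmod : PySem.Int.mod index ((cs.length : Int) ^ (m + 1)) = index % (cs.length : Int) ^ (m + 1) :=
      pv_mod_eq_emod _ _ hblo
    rw [hmod, pvRender_digits cs hcs (m + 1) _ (Int.emod_nonneg index (ne_of_gt hblo))
        (Int.emod_lt_of_pos index hblo)]
    congr 1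
    apply List.map_congr_left
    intro i hi
    have hi' : i < m + 1 := List.mem_range.mp hi
    rw [pvDigit_emod_pow cs hcs index (m + 1) (m + 1 - 1 - i) (by omega)]
    congr 1
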